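-- pv_equiv track=rewrite | github.com/PramudithaN/fyp_backend | app/services/news_fetcher.py | _ordered_phrase_matches
-- ===== SOURCE A (Python) =====
-- from typing import List, Dict, Any, Optional, Tuple
--
-- KEY_PHRASES = [
--     ("natural gas", "natural_gas"),
--     ("renewable energy", "renewable_energy"),
--     ("energy sector", "energy_sector"),
--     ("oil industry", "oil_industry"),
--     ("oil refinery", "oil_refinery"),
--     ("oil price", "oil_price"),
--     ("fuel price", "fuel_price"),
--     ("lng terminal", "lng_terminal"),
--     ("shipping route", "shipping_route"),
--     ("red sea", "red_sea"),
--     ("strait of hormuz", "strait_of_hormuz"),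
--     ("gulf of mexico", "gulf_of_mexico"),
--     ("north sea", "north_sea"),
--     ("middle east", "middle_east"),
--     ("supply cut", "supply_cut"),
--     ("production cut", "production_cut"),
-- ]
--
-- def _ordered_phrase_matches(clean_title: str) -> List[str]:
--     phrase_hits: List[Tuple[int, str]] = []
--     for phrase, canonical in KEY_PHRASES:
--         idx = clean_title.find(phrase)
--         if idx >= 0:
--             phrase_hits.append((idx, canonical))
--
--     phrase_hits.sort(key=lambda item: item[0])
--     return [phrase for _, phrase in phrase_hits]
-- ===== SOURCE B (Python) =====
-- from typing import List
--
-- KEY_PHRASES = [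
--     ("natural gas", "natural_gas"),
--     ("renewable energy", "renewable_energy"),
--     ("energy sector", "energy_sector"),
--     ("oil industry", "oil_industry"),
--     ("oil refinery", "oil_refinery"),
--     ("oil price", "oil_price"),
--     ("fuel price", "fuel_price"),
--     ("lng terminal", "lng_terminal"),
--     ("shipping route", "shipping_route"),
--     ("red sea", "red_sea"),
--     ("strait of hormuz", "strait_of_hormuz"),
--     ("gulf of mexico", "gulf_of_mexico"),
--     ("north sea", "north_sea"),
--     ("middle east", "middle_east"),
--     ("supply cut", "supply_cut"),
--     ("production cut", "production_cut"),
-- ]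
--
--
-- def _ordered_phrase_matches(clean_title: str) -> List[str]:
--     # Single left-to-right sweep: at each position emit each canonical tag the
--     # first time its phrase starts there.  No find(), no sort.
--     result: List[str] = []
--     seen = set()
--     for pos in range(len(clean_title)):
--         for phrase, canonical in KEY_PHRASES:
--             if canonical not in seen and clean_title.startswith(phrase, pos):
--                 seen.add(canonical)
--                 result.append(canonical)
--     return result
-- ===== Notes on version B (the rewrite author's own statement) =====
-- stated objective: alternative
-- what changed: Replaces the per-phrase find() pass followed by a stable sort with a single left-to-right sweep over the title's suffixes that emits each canonical at its first occurrence (a seen-set prevents duplicates), so no sort is needed.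
import Mathlib
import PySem

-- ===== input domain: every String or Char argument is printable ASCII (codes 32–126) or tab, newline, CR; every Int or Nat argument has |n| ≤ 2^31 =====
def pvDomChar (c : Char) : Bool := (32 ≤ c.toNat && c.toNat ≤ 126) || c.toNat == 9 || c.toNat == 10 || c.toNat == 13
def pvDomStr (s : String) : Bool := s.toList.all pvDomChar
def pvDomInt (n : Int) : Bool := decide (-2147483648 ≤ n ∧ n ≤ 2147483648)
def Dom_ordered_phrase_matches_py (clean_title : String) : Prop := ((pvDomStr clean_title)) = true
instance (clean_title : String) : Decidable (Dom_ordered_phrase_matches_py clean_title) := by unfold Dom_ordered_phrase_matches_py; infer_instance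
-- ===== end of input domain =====

-- B replaces A's per-phrase find() pass plus stable sort by a single left-to-right sweep over the
-- title's suffixes that emits each canonical at its first occurrence (objective: alternative algorithm).

-- module-level constant shared by A and B
def KEY_PHRASES : List (String × String) := [
  ("natural gas", "natural_gas"),
  ("renewable energy", "renewable_energy"),
  ("energy sector", "energy_sector"),
  ("oil industry", "oil_industry"),
  ("oil refinery", "oil_refinery"),
  ("oil price", "oil_price"),
  ("fuel price", "fuel_price"),
  ("lng terminal", "lng_terminal"),
  ("shipping route", "shipping_route"),
  ("red sea", "red_sea"),
  ("strait of hormuz", "strait_of_hormuz"),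
  ("gulf of mexico", "gulf_of_mexico"),
  ("north sea", "north_sea"),
  ("middle east", "middle_east"),
  ("supply cut", "supply_cut"),
  ("production cut", "production_cut")]

-- ===== PORT A =====
def ordered_phrase_matches_py (clean_title : String) : List String :=
  let phrase_hits : List (Int × String) :=
    KEY_PHRASES.foldl (fun acc pc =>
      let idx := PySem.Str.find clean_title pc.1
      if 0 ≤ idx then acc ++ [(idx, pc.2)] else acc) []
  (PySem.List.sorted phrase_hits (fun item => item.1)).map (fun item => item.2)

-- ===== PORT B =====
-- B's inner loop over KEY_PHRASES at one position pos of the sweep.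
-- Python's clean_title.startswith(phrase, pos) with 0 <= pos <= len is ported by hand as the
-- prefix test on the characters from position pos (exact there: CPython compares phrase
-- against the characters starting at pos).
def obStep (cs : List Char) (pos : Int) (st : List String × PySem.Set String) :
    List String × PySem.Set String :=
  KEY_PHRASES.foldl (fun st2 pc =>
    if !(PySem.Set.contains st2.2 pc.2) && PySem.Chars.startswith (cs.drop pos.toNat) pc.1.toList then
      (st2.1 ++ [pc.2], PySem.Set.add st2.2 pc.2)
    else st2) st

-- 'for pos in range(len(clean_title)): …'
def ordered_phrase_matches_py_alt (clean_title : String) : List String :=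
  ((PySem.List.pyRange 0 (PySem.Str.len clean_title)).foldl
    (fun st pos => obStep clean_title.toList pos st) ([], PySem.Set.empty)).1

-- ===== PRECONDITION & SPEC =====
def Spec_ordered_phrase_matches_py (clean_title : String) (out : List String) : Prop := out = ordered_phrase_matches_py_alt clean_title
instance (clean_title : String) (out : List String) : Decidable (Spec_ordered_phrase_matches_py clean_title out) := by unfold Spec_ordered_phrase_matches_py; infer_instance

-- ===== CLAIM (what is proved, stated in full; the proofs are below) =====
def Claim_equal_ordered_phrase_matches_py : Prop := ∀ (clean_title : String), Dom_ordered_phrase_matches_py clean_title → Spec_ordered_phrase_matches_py clean_title (ordered_phrase_matches_py clean_title)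

-- ===== LEMMAS AND PROOFS =====

-- `pvFirstAt cs p pos`: the phrase p occurs at position pos of cs, and at no earlier position.
def pvFirstAt (cs p : List Char) (pos : Nat) : Bool :=
  p.isPrefixOf (cs.drop pos) && (List.range pos).all fun j => !(p.isPrefixOf (cs.drop j))

-- canonicals emitted at one position of B's sweep / first-occurrence hits of A at that position
def pvHitsAt (cs : List Char) (pos : Nat) : List String :=
  KEY_PHRASES.filterMap fun pc => if pvFirstAt cs pc.1.toList pos then some pc.2 else none

def pvHitsAtI (cs : List Char) (pos : Nat) : List (Int × String) :=
  KEY_PHRASES.filterMap fun pc => if pvFirstAt cs pc.1.toList pos then some ((pos : Int), pc.2) else none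

lemma pvFirstAt_iff (cs p : List Char) (pos : Nat) :
    pvFirstAt cs p pos = true ↔ p <+: cs.drop pos ∧ ∀ j < pos, ¬ p <+: cs.drop j := by
  simp [pvFirstAt, List.all_eq_true, List.mem_range, ← List.isPrefixOf_iff_prefix]

-- concrete facts about the fixed KEY_PHRASES table
lemma kp_canon_ne : KEY_PHRASES.Pairwise (fun a b => a.2 ≠ b.2) := by decide

lemma kp_canon_inj : ∀ pc ∈ KEY_PHRASES, ∀ pc' ∈ KEY_PHRASES, pc.2 = pc'.2 → pc = pc' := by decide

lemma kp_incomp_pw : KEY_PHRASES.Pairwise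
    (fun a b => ¬ a.1.toList <+: b.1.toList ∧ ¬ b.1.toList <+: a.1.toList) := by decide

lemma kp_ne_nil : ∀ pc ∈ KEY_PHRASES, pc.1.toList ≠ [] := by decide

-- ---------- B side ----------

lemma obStep_fold (cs : List Char) (pos : Nat) :
    ∀ (ks : List (String × String)) (st : List String × PySem.Set String),
      ks.Pairwise (fun a b => a.2 ≠ b.2) →
      (∀ pc ∈ ks, (pc.2 ∈ st.2 ↔ ∃ j < pos, pc.1.toList <+: cs.drop j)) →
      (ks.foldl (fun st2 pc =>
          if !(PySem.Set.contains st2.2 pc.2) && PySem.Chars.startswith (cs.drop pos) pc.1.toList then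
            (st2.1 ++ [pc.2], PySem.Set.add st2.2 pc.2)
          else st2) st).1
        = st.1 ++ ks.filterMap (fun pc => if pvFirstAt cs pc.1.toList pos then some pc.2 else none)
      ∧ ∀ c : String,
          (c ∈ (ks.foldl (fun st2 pc =>
            if !(PySem.Set.contains st2.2 pc.2) && PySem.Chars.startswith (cs.drop pos) pc.1.toList then
              (st2.1 ++ [pc.2], PySem.Set.add st2.2 pc.2)
            else st2) st).2
          ↔ (c ∈ st.2 ∨ ∃ pc ∈ ks, pc.2 = c ∧ pvFirstAt cs pc.1.toList pos = true)) := by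
  intro ks
  induction ks with
  | nil => intro st _ _; simp
  | cons pc ks ih =>
    intro st hpw hseen
    rw [List.pairwise_cons] at hpw
    obtain ⟨hhead, htail⟩ := hpw
    have hseen_pc := hseen pc (List.mem_cons_self ..)
    have hcont_iff : (PySem.Set.contains st.2 pc.2 = true) ↔ pc.2 ∈ st.2 :=
      List.contains_iff_mem
    simp only [List.foldl_cons, List.filterMap_cons]
    by_cases hmem : pc.2 ∈ st.2
    · -- already seen: skipped, and pvFirstAt is false (an earlier occurrence exists)
      have hfa : pvFirstAt cs pc.1.toList pos = false := by
        rw [Bool.eq_false_iff]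
        intro h
        obtain ⟨j, hj, hpref⟩ := hseen_pc.1 hmem
        exact ((pvFirstAt_iff cs _ pos).1 h).2 j hj hpref
      rw [hcont_iff.2 hmem]
      simp only [Bool.not_true, Bool.false_and, Bool.false_eq_true, if_false, hfa]
      obtain ⟨h1, h2⟩ := ih st htail (fun pc' h' => hseen pc' (List.mem_cons_of_mem _ h'))
      refine ⟨h1, fun c => ?_⟩
      rw [h2 c]
      simp [hfa]
    · by_cases hs : PySem.Chars.startswith (cs.drop pos) pc.1.toList = true
      · -- emitted here: this is the first occurrence
        have hfa : pvFirstAt cs pc.1.toList pos = true := by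
          refine (pvFirstAt_iff cs _ pos).2 ⟨(PySem.Chars.startswith_iff ..).1 hs, ?_⟩
          intro j hj hpref
          exact hmem (hseen_pc.2 ⟨j, hj, hpref⟩)
        have hcont : PySem.Set.contains st.2 pc.2 = false := by
          rw [Bool.eq_false_iff]; intro h; exact hmem (hcont_iff.1 h)
        rw [hcont, hs]
        simp only [Bool.not_false, Bool.true_and, if_true, hfa]
        have hseen' : ∀ pc' ∈ ks,
            (pc'.2 ∈ (PySem.Set.add st.2 pc.2) ↔ ∃ j < pos, pc'.1.toList <+: cs.drop j) := by
          intro pc' h'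
          rw [PySem.Set.mem_add]
          constructor
          · rintro (h | h)
            · exact (hseen pc' (List.mem_cons_of_mem _ h')).1 h
            · exact absurd h.symm (hhead pc' h')
          · intro h
            exact Or.inl ((hseen pc' (List.mem_cons_of_mem _ h')).2 h)
        obtain ⟨h1, h2⟩ := ih (st.1 ++ [pc.2], PySem.Set.add st.2 pc.2) htail hseen'
        constructor
        · rw [h1]; simp
        · intro c
          rw [h2 c, PySem.Set.mem_add]
          constructor
          · rintro ((h | rfl) | h)
            · exact Or.inl h
            · exact Or.inr ⟨pc, List.mem_cons_self .., rfl, hfa⟩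
            · obtain ⟨pc', hpc', he, hfa'⟩ := h
              exact Or.inr ⟨pc', List.mem_cons_of_mem _ hpc', he, hfa'⟩
          · rintro (h | ⟨pc', hpc', he, hfa'⟩)
            · exact Or.inl (Or.inl h)
            · rcases List.mem_cons.1 hpc' with rfl | hpc''
              · exact Or.inl (Or.inr he.symm)
              · exact Or.inr ⟨pc', hpc'', he, hfa'⟩
      · -- phrase does not start here: skipped, pvFirstAt false
        have hfa : pvFirstAt cs pc.1.toList pos = false := by
          rw [Bool.eq_false_iff]
          intro h
          exact hs ((PySem.Chars.startswith_iff ..).2 ((pvFirstAt_iff cs _ pos).1 h).1)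
        rw [Bool.not_eq_true] at hs
        rw [hs]
        simp only [Bool.and_false, Bool.false_eq_true, if_false, hfa]
        obtain ⟨h1, h2⟩ := ih st htail (fun pc' h' => hseen pc' (List.mem_cons_of_mem _ h'))
        refine ⟨h1, fun c => ?_⟩
        rw [h2 c]
        simp [hfa]

lemma scan_range' (cs : List Char) :
    ∀ (k pos : Nat) (st : List String × PySem.Set String), pos + k = cs.length →
      (∀ pc ∈ KEY_PHRASES, (pc.2 ∈ st.2 ↔ ∃ j < pos, pc.1.toList <+: cs.drop j)) →
      ((List.range' pos k).foldl (fun st (p : Nat) => obStep cs (p : Int) st) st).1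
        = st.1 ++ (List.range' pos k).flatMap (pvHitsAt cs) := by
  intro k
  induction k with
  | zero => intro pos st _ _; simp
  | succ k ih =>
    intro pos st hlen hseen
    have hstep := obStep_fold cs pos KEY_PHRASES st kp_canon_ne hseen
    have hob : obStep cs (pos : Int) st
        = (KEY_PHRASES.foldl (fun st2 pc =>
            if !(PySem.Set.contains st2.2 pc.2) && PySem.Chars.startswith (cs.drop pos) pc.1.toList then
              (st2.1 ++ [pc.2], PySem.Set.add st2.2 pc.2)
            else st2) st) := by
      simp only [obStep, Int.toNat_natCast]; rfl
    have hseen' : ∀ pc ∈ KEY_PHRASES,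
        (pc.2 ∈ (obStep cs (pos : Int) st).2 ↔ ∃ j < pos + 1, pc.1.toList <+: cs.drop j) := by
      intro pc hpc
      rw [hob, hstep.2 pc.2]
      constructor
      · rintro (h | ⟨pc', hpc', he, hfa⟩)
        · obtain ⟨j, hj, hp⟩ := (hseen pc hpc).1 h
          exact ⟨j, by omega, hp⟩
        · have : pc' = pc := kp_canon_inj pc' hpc' pc hpc he
          subst this
          exact ⟨pos, by omega, ((pvFirstAt_iff ..).1 hfa).1⟩
      · rintro ⟨j, hj, hp⟩
        by_cases hjp : j < pos
        · exact Or.inl ((hseen pc hpc).2 ⟨j, hjp, hp⟩)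
        · have hj' : j = pos := by omega
          subst hj'
          by_cases hmb : ∃ i < j, pc.1.toList <+: cs.drop i
          · exact Or.inl ((hseen pc hpc).2 hmb)
          · refine Or.inr ⟨pc, hpc, rfl, (pvFirstAt_iff ..).2 ⟨hp, ?_⟩⟩
            intro i hi hpi; exact hmb ⟨i, hi, hpi⟩
    have h1 : (obStep cs (pos : Int) st).1 = st.1 ++ pvHitsAt cs pos := by
      rw [hob]; exact hstep.1
    rw [List.range'_succ, List.foldl_cons,
      ih (pos + 1) (obStep cs (pos : Int) st) (by omega) hseen', h1,
      List.flatMap_cons, List.append_assoc]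

lemma alt_eq_flatMap (clean_title : String) :
    ordered_phrase_matches_py_alt clean_title
      = (List.range' 0 clean_title.toList.length).flatMap (pvHitsAt clean_title.toList) := by
  unfold ordered_phrase_matches_py_alt
  rw [PySem.Str.len_eq, PySem.List.pyRange_zero_nat, List.foldl_map]
  have h := scan_range' clean_title.toList clean_title.toList.length 0 ([], PySem.Set.empty)
    (by omega) (by intro pc _; simp [PySem.Set.empty])
  rw [List.range_eq_range']
  simpa using h

-- ---------- A side ----------

-- generic exchange: scanning positions outside and phrases inside is a permutation of the converse
lemma flatMap_filterMap_perm {α γ : Type} (l1 : List Nat) (g : Nat → α → Option γ) :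
    ∀ (l2 : List α),
      (l1.flatMap fun i => l2.filterMap (g i)).Perm (l2.flatMap fun x => l1.filterMap fun i => g i x) := by
  intro l2
  induction l2 with
  | nil => simp
  | cons x xs ih =>
    have hsplit : ∀ i : Nat, (x :: xs).filterMap (g i) = (g i x).toList ++ xs.filterMap (g i) := by
      intro i; cases h : g i x <;> simp [h]
    rw [List.flatMap_cons]
    simp only [hsplit]
    refine ((List.flatMap_append_perm l1 _ _).symm).trans ?_
    rw [← List.filterMap_eq_flatMap_toList]
    exact ih.append_left _

lemma filterMap_singleton_of_unique {α γ : Type} :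
    ∀ (l : List α) (f : α → Option γ) (a : α) (v : γ), a ∈ l → f a = some v →
      (∀ b ∈ l, b ≠ a → f b = none) → l.Nodup → l.filterMap f = [v] := by
  intro l
  induction l with
  | nil => intro f a v h; cases h
  | cons b l ih =>
    intro f a v hmem hfa hothers hnd
    rcases List.mem_cons.1 hmem with rfl | hmem'
    · have hrest : l.filterMap f = [] :=
        List.filterMap_eq_nil_iff.2 (fun b hb =>
          hothers b (List.mem_cons_of_mem _ hb)
            (by rintro rfl; exact (List.nodup_cons.1 hnd).1 hb))
      simp [hfa, hrest]
    · have hb : f b = none :=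
        hothers b (List.mem_cons_self ..)
          (by rintro rfl; exact (List.nodup_cons.1 hnd).1 hmem')
      rw [List.filterMap_cons, hb]
      exact ih f a v hmem' hfa
        (fun b' hb' hne => hothers b' (List.mem_cons_of_mem _ hb') hne)
        (List.nodup_cons.1 hnd).2

lemma hits_per_phrase (cs : List Char) (pc : String × String) (hpc : pc ∈ KEY_PHRASES) :
    (List.range' 0 cs.length).filterMap
        (fun pos => if pvFirstAt cs pc.1.toList pos then some ((pos : Int), pc.2) else none)
      = if 0 ≤ PySem.Chars.find cs pc.1.toList then [(PySem.Chars.find cs pc.1.toList, pc.2)] else [] := by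
  by_cases hf : 0 ≤ PySem.Chars.find cs pc.1.toList
  · rw [if_pos hf]
    obtain ⟨hpref, hmin⟩ := PySem.Chars.find_spec hf
    have hlt : (PySem.Chars.find cs pc.1.toList).toNat < cs.length := by
      by_contra h
      have hnil : cs.drop (PySem.Chars.find cs pc.1.toList).toNat = [] := by
        rw [List.drop_eq_nil_iff]; omega
      rw [hnil] at hpref
      exact kp_ne_nil pc hpc (List.prefix_nil.1 hpref)
    apply filterMap_singleton_of_unique _ _ (PySem.Chars.find cs pc.1.toList).toNat
    · rw [List.mem_range'_1]; omega
    · rw [if_pos ((pvFirstAt_iff ..).2 ⟨hpref, hmin⟩)]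
      rw [Int.toNat_of_nonneg hf]
    · intro b _ hne
      rw [if_neg]
      intro hfab
      obtain ⟨hp1, hp2⟩ := (pvFirstAt_iff ..).1 hfab
      rcases Nat.lt_or_ge b (PySem.Chars.find cs pc.1.toList).toNat with hb | hb
      · exact hmin b hb hp1
      · have hb' : (PySem.Chars.find cs pc.1.toList).toNat < b := by omega
        exact hp2 _ hb' hpref
    · exact List.nodup_range' 1
  · rw [if_neg hf]
    apply List.filterMap_eq_nil_iff.2
    intro pos _
    rw [if_neg]
    intro hfa
    have hpref := ((pvFirstAt_iff ..).1 hfa).1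
    exact hf ((PySem.Chars.find_nonneg_iff ..).2
      ((PySem.Chars.isIn_iff_infix ..).1
        ((PySem.Chars.exists_prefix_drop_iff_isIn ..).1 ⟨pos, hpref⟩)))

lemma mem_hitsAtI_fst {cs : List Char} {pos : Nat} {x : Int × String} (hx : x ∈ pvHitsAtI cs pos) :
    x.1 = (pos : Int) := by
  obtain ⟨pc, _, hif⟩ := List.mem_filterMap.1 hx
  by_cases h : pvFirstAt cs pc.1.toList pos = true
  · rw [if_pos h] at hif
    cases hif; rfl
  · rw [if_neg h] at hif
    cases hif

lemma hitsAtI_pairwise (cs : List Char) (pos : Nat) :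
    (pvHitsAtI cs pos).Pairwise (fun a b => a.1 < b.1) := by
  unfold pvHitsAtI
  suffices h : ∀ ks : List (String × String),
      ks.Pairwise (fun a b => ¬ a.1.toList <+: b.1.toList ∧ ¬ b.1.toList <+: a.1.toList) →
      (ks.filterMap fun pc =>
        if pvFirstAt cs pc.1.toList pos then some ((pos : Int), pc.2) else none).Pairwise
        (fun a b => a.1 < b.1) from h _ kp_incomp_pw
  intro ks hpw
  induction ks with
  | nil => simp
  | cons pc ks ih =>
    rw [List.pairwise_cons] at hpw
    by_cases hfa : pvFirstAt cs pc.1.toList pos = true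
    · have hrest : (ks.filterMap fun pc =>
          if pvFirstAt cs pc.1.toList pos then some ((pos : Int), pc.2) else none) = [] := by
        apply List.filterMap_eq_nil_iff.2
        intro pc' hpc'
        rw [if_neg]
        intro hfa'
        have h1 := ((pvFirstAt_iff ..).1 hfa).1
        have h2 := ((pvFirstAt_iff ..).1 hfa').1
        rcases List.prefix_or_prefix_of_prefix h1 h2 with h | h
        · exact (hpw.1 pc' hpc').1 h
        · exact (hpw.1 pc' hpc').2 h
      simp [hfa, hrest]
    · simp only [List.filterMap_cons, hfa, Bool.false_eq_true, if_false]
      exact ih hpw.2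

lemma ysC_pairwise (cs : List Char) :
    ((List.range' 0 cs.length).flatMap (pvHitsAtI cs)).Pairwise (fun a b => a.1 < b.1) := by
  rw [List.flatMap_def, List.pairwise_flatten]
  constructor
  · intro l hl
    obtain ⟨pos, _, rfl⟩ := List.mem_map.1 hl
    exact hitsAtI_pairwise cs pos
  · rw [List.pairwise_map]
    refine List.Pairwise.imp ?_ (List.pairwise_lt_range' 1)
    intro pos1 pos2 hlt x hx y hy
    rw [mem_hitsAtI_fst hx, mem_hitsAtI_fst hy]
    exact_mod_cast hlt

lemma flatMap_if_singleton {α γ : Type} (p : α → Bool) (f : α → γ) :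
    ∀ l : List α, (l.flatMap fun x => if p x then [f x] else []) = (l.filter p).map f := by
  intro l
  induction l with
  | nil => simp
  | cons x xs ih =>
    by_cases h : p x = true <;>
      simp [List.flatMap_cons, h, ih]

lemma ysC_perm_hits (cs : List Char) :
    ((List.range' 0 cs.length).flatMap (pvHitsAtI cs)).Perm
      ((KEY_PHRASES.filter fun pc => decide (0 ≤ PySem.Chars.find cs pc.1.toList)).map
        (fun pc => (PySem.Chars.find cs pc.1.toList, pc.2))) := by
  refine (flatMap_filterMap_perm (List.range' 0 cs.length)
    (fun pos pc => if pvFirstAt cs pc.1.toList pos then some ((pos : Int), pc.2) else none)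
    KEY_PHRASES).trans ?_
  have hcong : (KEY_PHRASES.flatMap fun pc => (List.range' 0 cs.length).filterMap
        (fun pos => if pvFirstAt cs pc.1.toList pos then some ((pos : Int), pc.2) else none))
      = KEY_PHRASES.flatMap fun pc =>
          if decide (0 ≤ PySem.Chars.find cs pc.1.toList) then
            [(PySem.Chars.find cs pc.1.toList, pc.2)] else [] := by
    apply List.flatMap_congr
    intro pc hpc
    rw [hits_per_phrase cs pc hpc]
    by_cases h : 0 ≤ PySem.Chars.find cs pc.1.toList <;> simp [h]
  rw [hcong, flatMap_if_singleton]

lemma a_eq_flatMap (clean_title : String) :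
    ordered_phrase_matches_py clean_title
      = (List.range' 0 clean_title.toList.length).flatMap (pvHitsAt clean_title.toList) := by
  unfold ordered_phrase_matches_py
  have hfold : KEY_PHRASES.foldl (fun acc pc =>
        let idx := PySem.Str.find clean_title pc.1
        if 0 ≤ idx then acc ++ [(idx, pc.2)] else acc) ([] : List (Int × String))
      = (KEY_PHRASES.filter fun pc =>
          decide (0 ≤ PySem.Chars.find clean_title.toList pc.1.toList)).map
          (fun pc => (PySem.Chars.find clean_title.toList pc.1.toList, pc.2)) := by
    have := PySem.List.foldl_append_if
      (fun pc : String × String => decide (0 ≤ PySem.Chars.find clean_title.toList pc.1.toList))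
      (fun pc : String × String => (PySem.Chars.find clean_title.toList pc.1.toList, pc.2))
      KEY_PHRASES ([] : List (Int × String))
    simpa using this
  simp only [hfold]
  rw [PySem.List.sorted_eq_of_perm_of_pairwise_lt _ _ _ (ysC_perm_hits clean_title.toList)
    (ysC_pairwise clean_title.toList)]
  simp only [pvHitsAtI, List.map_flatMap, List.map_filterMap, apply_ite]
  rfl

-- ===== VERDICT (by name: the statement is the Claim_ definition above) =====
theorem ordered_phrase_matches_py_spec : Claim_equal_ordered_phrase_matches_py := by
  intro s _
  unfold Spec_ordered_phrase_matches_py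
  rw [a_eq_flatMap, alt_eq_flatMap]
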